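-- pv_equiv track=rewrite | github.com/PuffCoder/COSC401 | CandidateEliminationAlgorithm/cea.py | update_G
-- ===== SOURCE A (Python) =====
-- def update_G(G, example, domains):
--     """根据反例更新 G"""
--     temp_G = []
--     for g in G:
--         for i, value in enumerate(g):
--             if value == '?':
--                 # 对于每个 '?'，尝试将它替换为除了反例特征值之外的所有可能值
--                 for domain_value in domains[i]:
--                     if domain_value != example[i]:
--                         new_g = list(g)
--                         new_g[i] = domain_value
--                         temp_G.append(tuple(new_g))
--     return minimize_G(temp_G, G)
--
-- def minimize_G(temp_G, G):
--     """最小化 G，移除更特殊的假设"""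
--     minimized_G = []
--     for g in temp_G:
--         if all(not all(x==y or y=='?' for x,y in zip(g, other_g)) for other_g in temp_G if g != other_g):
--             minimized_G.append(g)
--     return minimized_G
-- ===== SOURCE B (Python) =====
-- def _covers(s, g):
--     """s is at least as general as g coordinatewise (equal or '?' in s)."""
--     return all(x == y or y == '?' for x, y in zip(g, s))
--
-- def update_G(G, example, domains):
--     temp_G = [tuple(g[:i]) + (dv,) + tuple(g[i + 1:])
--               for g in G
--               for i, v in enumerate(g) if v == '?'
--               for dv in domains[i] if dv != example[i]]
--     frontier = []
--     for g in temp_G: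
--         if any(o != g and _covers(o, g) for o in frontier):
--             continue
--         frontier = [o for o in frontier if not (o != g and _covers(g, o))]
--         frontier.append(g)
--     return frontier
-- ===== Notes on version B (the rewrite author's own statement) =====
-- stated objective: alternative
-- what changed: minimize_G's full pairwise scan of temp_G is replaced by a single pass that maintains the maximal frontier incrementally (skip a dominated candidate, evict frontier members the candidate dominates), and temp_G is built by one comprehension instead of nested append loops.
-- outside the precondition, e.g. on update_G([('?',), ('?', 'x')], ['a', 'x'], [['a', 'b'], ['x']]): A returns [], B returns [('b',)]
import Mathlib
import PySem

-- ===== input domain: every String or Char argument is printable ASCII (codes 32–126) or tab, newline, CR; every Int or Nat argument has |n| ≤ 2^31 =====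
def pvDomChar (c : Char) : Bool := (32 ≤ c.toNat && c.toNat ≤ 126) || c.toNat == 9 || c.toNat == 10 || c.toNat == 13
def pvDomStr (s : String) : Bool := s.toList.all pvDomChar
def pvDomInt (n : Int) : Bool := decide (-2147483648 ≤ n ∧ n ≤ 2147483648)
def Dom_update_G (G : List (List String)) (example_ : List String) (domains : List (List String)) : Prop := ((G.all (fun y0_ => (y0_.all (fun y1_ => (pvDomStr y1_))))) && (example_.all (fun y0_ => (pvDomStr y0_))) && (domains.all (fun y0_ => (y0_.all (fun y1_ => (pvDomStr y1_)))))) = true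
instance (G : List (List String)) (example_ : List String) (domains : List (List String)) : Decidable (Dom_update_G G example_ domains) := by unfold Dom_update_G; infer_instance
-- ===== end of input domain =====

-- B replaces A's full pairwise scan of temp_G by incremental maximal-frontier maintenance (alternative algorithm, same result).

-- ===== PORT A =====
-- the temp_G-building loops of A (indices i from enumerate are ≥ 0; domains[i] / example[i] are exact via pyGetD under Pre_)
def update_G_tempG (G : List (List String)) (example_ : List String) (domains : List (List String)) : List (List String) :=
  G.foldl (fun temp g =>
    (PySem.List.enumerate g).foldl (fun temp iv =>
      if iv.2 == "?" then
        (PySem.List.pyGetD domains iv.1 []).foldl (fun temp dv =>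
          if dv != PySem.List.pyGetD example_ iv.1 "" then
            temp ++ [PySem.List.pySetD g iv.1 dv]
          else temp) temp
      else temp) temp) []

-- minimize_G of A (its parameter G, unused by the Python too, is kept)
def update_G_minimize (temp_G : List (List String)) (G : List (List String)) : List (List String) :=
  temp_G.foldl (fun minimized g =>
    if (temp_G.filter (fun o => g != o)).all
        (fun o => !((g.zip o).all (fun p => p.1 == p.2 || p.2 == "?"))) then
      minimized ++ [g]
    else minimized) []

def update_G (G : List (List String)) (example_ : List String) (domains : List (List String)) : List (List String) :=
  update_G_minimize (update_G_tempG G example_ domains) G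

-- ===== PORT B =====
-- _covers s g: s is at least as general as g coordinatewise
def covers (s g : List String) : Bool := (g.zip s).all (fun p => p.1 == p.2 || p.2 == "?")

-- the temp_G comprehension of Source B (g[:i] + (dv,) + g[i+1:] via PySem slices)
def update_G_alt_tempG (G : List (List String)) (example_ : List String) (domains : List (List String)) : List (List String) :=
  G.flatMap (fun g =>
    (PySem.List.enumerate g).flatMap (fun iv =>
      if iv.2 == "?" then
        ((PySem.List.pyGetD domains iv.1 []).filter
            (fun dv => dv != PySem.List.pyGetD example_ iv.1 "")).map
          (fun dv => PySem.List.slice g none (some iv.1) ++ dv :: PySem.List.slice g (some (iv.1 + 1)) none)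
      else []))

-- one step of Source B's frontier loop
def insertFrontier (frontier : List (List String)) (g : List String) : List (List String) :=
  if frontier.any (fun o => o != g && covers o g) then frontier
  else frontier.filter (fun o => !(o != g && covers g o)) ++ [g]

def update_G_alt (G : List (List String)) (example_ : List String) (domains : List (List String)) : List (List String) :=
  (update_G_alt_tempG G example_ domains).foldl insertFrontier []

-- ===== PRECONDITION & SPEC =====
-- Pre_ excludes (a) G whose '?'-containing rows have unequal lengths, where A's value depends on zip truncating the shorter
-- tuple — an accident under which two distinct tuples can each count as 'more general' than the other — and
-- (b) exactly the inputs where a '?' sits at an index on which domains[i] or example[i] raises IndexError.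
def Pre_update_G (G : List (List String)) (example_ : List String) (domains : List (List String)) : Prop :=
  (∀ g ∈ G, "?" ∈ g → ∀ h ∈ G, "?" ∈ h → g.length = h.length) ∧
  (∀ g ∈ G, ∀ i : Nat, i < g.length → g.getD i "" = "?" →
     i < domains.length ∧ (domains.getD i [] ≠ [] → i < example_.length))
instance (G : List (List String)) (example_ : List String) (domains : List (List String)) : Decidable (Pre_update_G G example_ domains) := by unfold Pre_update_G; infer_instance

def pvWitness_update_G : List (List String) × List String × List (List String) :=
  ([["?", "a"], ["b", "?"]], (["a", "b"], [["a", "b"], ["a", "b"]]))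

def Spec_update_G (G : List (List String)) (example_ : List String) (domains : List (List String)) (out : List (List String)) : Prop := out = update_G_alt G example_ domains
instance (G : List (List String)) (example_ : List String) (domains : List (List String)) (out : List (List String)) : Decidable (Spec_update_G G example_ domains out) := by unfold Spec_update_G; infer_instance

-- ===== CLAIM (what is proved, stated in full; the proofs are below) =====
def Claim_equal_update_G : Prop := ∀ (G : List (List String)) (example_ : List String) (domains : List (List String)), Dom_update_G G example_ domains → Pre_update_G G example_ domains → Spec_update_G G example_ domains (update_G G example_ domains)

-- ===== LEMMAS AND PROOFS =====

-- maximality of g within L under `covers` (the condition A's minimize_G tests against the whole temp_G)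
def maxIn (L : List (List String)) (g : List String) : Bool :=
  L.all (fun o => o == g || !(covers o g))

lemma covers_cons (y x : String) (ys xs : List String) :
    covers (y :: ys) (x :: xs) = ((x == y || y == "?") && covers ys xs) := by
  simp [covers]

lemma covers_refl (g : List String) : covers g g = true := by
  induction g with
  | nil => rfl
  | cons x xs ih => simp [covers_cons, ih]

lemma covers_antisymm {g o : List String} (hl : g.length = o.length)
    (h1 : covers o g = true) (h2 : covers g o = true) : g = o := by
  induction g generalizing o with
  | nil => cases o with
    | nil => rfl
    | cons y ys => simp at hl
  | cons x xs ih =>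
    cases o with
    | nil => simp at hl
    | cons y ys =>
      rw [covers_cons, Bool.and_eq_true] at h1 h2
      simp only [Bool.or_eq_true, beq_iff_eq] at h1 h2
      simp only [List.length_cons, Nat.add_right_cancel_iff] at hl
      have hx : x = y := by
        rcases h1.1 with h | h
        · exact h
        · rcases h2.1 with h' | h'
          · exact h'.symm
          · rw [h, h']
      rw [hx, ih hl h1.2 h2.2]

lemma covers_trans {g o m : List String} (h1 : g.length = o.length) (h2 : o.length = m.length)
    (c1 : covers o g = true) (c2 : covers m o = true) : covers m g = true := by
  induction g generalizing o m with
  | nil => simp [covers]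
  | cons x xs ih =>
    cases o with
    | nil => simp at h1
    | cons y ys =>
      cases m with
      | nil => simp at h2
      | cons z zs =>
        rw [covers_cons, Bool.and_eq_true] at c1 c2 ⊢
        simp only [Bool.or_eq_true, beq_iff_eq] at c1 c2 ⊢
        simp only [List.length_cons, Nat.add_right_cancel_iff] at h1 h2
        refine ⟨?_, ih h1 h2 c1.2 c2.2⟩
        rcases c2.1 with h | h
        · rcases c1.1 with h' | h'
          · left; rw [h', h]
          · right; rw [← h, h']
        · right; exact h

-- A's per-element test against its filtered temp_G is exactly maximality in temp_G
lemma keep_eq (T : List (List String)) (g : List String) :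
    ((T.filter (fun o => g != o)).all (fun o => !((g.zip o).all (fun p => p.1 == p.2 || p.2 == "?"))))
      = maxIn T g := by
  induction T with
  | nil => rfl
  | cons o T ih =>
    unfold maxIn at *
    by_cases h : g = o
    · subst h
      simp [ih, covers]
    · have h1 : (g != o) = true := by simp [h]
      have h2 : (o == g) = false := by simp; exact fun e => h e.symm
      simp [h1, h2, ih, covers]

lemma minimize_eq_filter (T G : List (List String)) :
    update_G_minimize T G = T.filter (maxIn T) := by
  unfold update_G_minimize
  rw [PySem.List.foldl_append_if_eq_filter]
  simp only [keep_eq, List.nil_append]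

-- both temp_G builders produce the same list
lemma tempG_eq (G : List (List String)) (example_ : List String) (domains : List (List String)) :
    update_G_tempG G example_ domains = update_G_alt_tempG G example_ domains := by
  unfold update_G_tempG update_G_alt_tempG
  have hstep : ∀ (g : List String) (temp : List (List String)),
      (PySem.List.enumerate g).foldl (fun temp iv =>
        if iv.2 == "?" then
          (PySem.List.pyGetD domains iv.1 []).foldl (fun temp dv =>
            if dv != PySem.List.pyGetD example_ iv.1 "" then
              temp ++ [PySem.List.pySetD g iv.1 dv]
            else temp) temp
        else temp) temp
      = temp ++ (PySem.List.enumerate g).flatMap (fun iv =>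
          if iv.2 == "?" then
            ((PySem.List.pyGetD domains iv.1 []).filter
                (fun dv => dv != PySem.List.pyGetD example_ iv.1 "")).map
              (fun dv => PySem.List.slice g none (some iv.1) ++ dv :: PySem.List.slice g (some (iv.1 + 1)) none)
          else []) := by
    intro g temp
    have hfn : (fun (temp : List (List String)) (iv : Int × String) =>
        if iv.2 == "?" then
          (PySem.List.pyGetD domains iv.1 []).foldl (fun temp dv =>
            if dv != PySem.List.pyGetD example_ iv.1 "" then
              temp ++ [PySem.List.pySetD g iv.1 dv]
            else temp) temp
        else temp)
        = (fun temp iv => temp ++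
            (if iv.2 == "?" then
              ((PySem.List.pyGetD domains iv.1 []).filter
                  (fun dv => dv != PySem.List.pyGetD example_ iv.1 "")).map
                (fun dv => PySem.List.pySetD g iv.1 dv)
            else [])) := by
      funext temp iv
      split
      · rw [PySem.List.foldl_append_if]
      · simp
    rw [hfn, PySem.List.foldl_append_eq_flatMap]
    congr 1
    apply List.flatMap_congr
    intro iv hiv
    rw [PySem.List.mem_enumerate_iff] at hiv
    obtain ⟨k, hk, rfl⟩ := hiv
    split
    · apply List.map_congr_left
      intro dv _
      have h1 : ((0 : Int) + (k : Int)) = ((k : Nat) : Int) := by omega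
      rw [h1, PySem.List.pySetD_natCast, PySem.List.slice_to_natCast]
      have h2 : ((k : Int) + 1) = (((k + 1 : Nat)) : Int) := by norm_num
      rw [h2, PySem.List.slice_from_natCast]
      exact List.set_eq_take_cons_drop dv hk
    · rfl
  have hfn2 : (fun (temp : List (List String)) (g : List String) =>
      (PySem.List.enumerate g).foldl (fun temp iv =>
        if iv.2 == "?" then
          (PySem.List.pyGetD domains iv.1 []).foldl (fun temp dv =>
            if dv != PySem.List.pyGetD example_ iv.1 "" then
              temp ++ [PySem.List.pySetD g iv.1 dv]
            else temp) temp
        else temp) temp)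
      = (fun temp g => temp ++ (PySem.List.enumerate g).flatMap (fun iv =>
          if iv.2 == "?" then
            ((PySem.List.pyGetD domains iv.1 []).filter
                (fun dv => dv != PySem.List.pyGetD example_ iv.1 "")).map
              (fun dv => PySem.List.slice g none (some iv.1) ++ dv :: PySem.List.slice g (some (iv.1 + 1)) none)
          else [])) := by
    funext temp g; exact hstep g temp
  rw [hfn2, PySem.List.foldl_append_eq_flatMap]
  simp

-- general: filtering by a pointwise-stronger predicate with a strict witness is strictly shorter
lemma filter_length_lt {α : Type} (L : List α) (p q : α → Bool)
    (himp : ∀ x ∈ L, p x = true → q x = true) (m : α) (hm : m ∈ L)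
    (hq : q m = true) (hp : p m = false) :
    (L.filter p).length < (L.filter q).length := by
  induction L with
  | nil => cases hm
  | cons a L ih =>
    have himp' : ∀ x ∈ L, p x = true → q x = true :=
      fun x hx => himp x (List.mem_cons_of_mem a hx)
    have hle : (L.filter p).length ≤ (L.filter q).length := by
      simpa [← List.countP_eq_length_filter] using List.countP_mono_left himp'
    rcases List.mem_cons.mp hm with rfl | hm'
    · rw [List.filter_cons, List.filter_cons, hp, hq]
      simp only [if_true, Bool.false_eq_true, if_false, List.length_cons]
      omega
    · by_cases hqa : q a = true
      · rw [List.filter_cons, List.filter_cons, hqa]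
        by_cases hpa : p a = true
        · rw [hpa]
          simp only [if_true, List.length_cons]
          have := ih himp' hm'
          omega
        · simp only [hpa, Bool.false_eq_true, if_false, if_true, List.length_cons]
          have := ih himp' hm'
          omega
      · have hpa : p a = false := by
          cases h : p a
          · rfl
          · exact absurd (himp a (List.mem_cons_self) h) (by simp [hqa])
        rw [List.filter_cons, List.filter_cons, hpa]
        simp only [Bool.false_eq_true, if_false, hqa]
        exact ih himp' hm'

lemma exists_max_aux (L : List (List String)) (H : ∀ a ∈ L, ∀ b ∈ L, a.length = b.length) :
    ∀ (n : Nat) (o : List String), o ∈ L →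
      (L.filter (fun m => m != o && covers m o)).length ≤ n →
      ∃ m ∈ L, maxIn L m = true ∧ covers m o = true := by
  intro n
  induction n with
  | zero =>
    intro o ho hlen
    by_cases hmax : maxIn L o = true
    · exact ⟨o, ho, hmax, covers_refl o⟩
    · exfalso
      have hmaxf : maxIn L o = false := Bool.eq_false_iff.mpr hmax
      unfold maxIn at hmaxf
      obtain ⟨m1, hm1, hne⟩ := List.all_eq_false.mp hmaxf
      simp at hne
      have hm1o : m1 ≠ o := by simpa using hne.1
      have : m1 ∈ L.filter (fun m => m != o && covers m o) := by
        simp [List.mem_filter, hm1, hm1o, hne.2]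
      have := List.length_pos_of_mem this
      omega
  | succ n ih =>
    intro o ho hlen
    by_cases hmax : maxIn L o = true
    · exact ⟨o, ho, hmax, covers_refl o⟩
    · have hmaxf : maxIn L o = false := Bool.eq_false_iff.mpr hmax
      unfold maxIn at hmaxf
      obtain ⟨m1, hm1, hne⟩ := List.all_eq_false.mp hmaxf
      simp at hne
      have hm1o : m1 ≠ o := by simpa using hne.1
      have hcov : covers m1 o = true := hne.2
      -- strictly fewer elements above m1 than above o
      have hlt : (L.filter (fun m => m != m1 && covers m m1)).length
          < (L.filter (fun m => m != o && covers m o)).length := by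
        apply filter_length_lt L _ _ ?_ m1 hm1 ?_ ?_
        · intro x hx hpx
          simp only [Bool.and_eq_true, bne_iff_ne, ne_eq] at hpx ⊢
          refine ⟨?_, covers_trans (H o ho m1 hm1) (H m1 hm1 x hx) hcov hpx.2⟩
          intro hxo; subst hxo
          exact hm1o (covers_antisymm (H m1 hm1 x hx) hpx.2 hcov)
        · simp [hm1o, hcov]
        · simp
      obtain ⟨m, hm, hmmax, hmc⟩ := ih m1 hm1 (by omega)
      exact ⟨m, hm, hmmax, covers_trans (H o ho m1 hm1) (H m1 hm1 m hm) hcov hmc⟩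

-- every element of L is covered by some maximal element of L (lengths equal)
lemma exists_max (L : List (List String)) (H : ∀ a ∈ L, ∀ b ∈ L, a.length = b.length)
    {o : List String} (ho : o ∈ L) :
    ∃ m ∈ L, maxIn L m = true ∧ covers m o = true :=
  exists_max_aux L H (L.filter (fun m => m != o && covers m o)).length o ho le_rfl

lemma maxIn_append_singleton (P : List (List String)) (g x : List String) :
    maxIn (P ++ [g]) x = (maxIn P x && (g == x || !(covers g x))) := by
  simp [maxIn, List.all_append]

-- one frontier step from the invariant state
lemma insertFrontier_step (P : List (List String)) (g : List String)
    (H : ∀ a ∈ P ++ [g], ∀ b ∈ P ++ [g], a.length = b.length) :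
    insertFrontier (P.filter (maxIn P)) g = (P ++ [g]).filter (maxIn (P ++ [g])) := by
  have Hmem : ∀ a ∈ P, a ∈ P ++ [g] := fun a ha => List.mem_append_left _ ha
  have hgmem : g ∈ P ++ [g] := List.mem_append_right _ (List.mem_singleton.2 rfl)
  by_cases hc : (P.filter (maxIn P)).any (fun o => o != g && covers o g) = true
  · obtain ⟨o, ho, hP⟩ := List.any_eq_true.mp hc
    have hoP : o ∈ P := (List.mem_filter.mp ho).1
    simp only [Bool.and_eq_true, bne_iff_ne, ne_eq] at hP
    have hog : o ≠ g := hP.1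
    have hcov : covers o g = true := hP.2
    have hgmax : maxIn (P ++ [g]) g = false := by
      unfold maxIn
      rw [List.all_eq_false]
      exact ⟨o, Hmem o hoP, by simp [hog, hcov]⟩
    have hfilter : P.filter (maxIn (P ++ [g])) = P.filter (maxIn P) := by
      apply List.filter_congr
      intro x hx
      rw [maxIn_append_singleton]
      cases hmx : maxIn P x with
      | false => simp
      | true =>
        simp only [Bool.true_and]
        by_cases hgx : covers g x = true
        · by_cases hgxe : g = x
          · simp [hgxe]
          · exfalso
            have hxo : covers o x = true :=
              covers_trans (H x (Hmem x hx) g hgmem) (H g hgmem o (Hmem o hoP)) hgx hcov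
            have hxneo : x ≠ o := by
              intro he; subst he
              exact hog (covers_antisymm (H g hgmem x (Hmem x hx)) hcov hgx).symm
            unfold maxIn at hmx
            have h := List.all_eq_true.mp hmx o hoP
            have hne' : ¬o = x := fun h' => hxneo h'.symm
            simp [hne', hxo] at h
        · simp [hgx]
    rw [insertFrontier, if_pos hc, List.filter_append, hfilter]
    simp [hgmax]
  · have hcF : (P.filter (maxIn P)).any (fun o => o != g && covers o g) = false :=
      Bool.eq_false_iff.mpr hc
    have hno : ∀ o ∈ P, maxIn P o = true → ¬(o ≠ g ∧ covers o g = true) := by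
      intro o hoP homax hcontra
      have : o ∈ P.filter (maxIn P) := List.mem_filter.mpr ⟨hoP, homax⟩
      have := List.any_eq_false.mp hcF o this
      simp [hcontra.1, hcontra.2] at this
    have hgmax : maxIn (P ++ [g]) g = true := by
      unfold maxIn
      rw [List.all_append]
      have h2 : List.all [g] (fun o => o == g || !(covers o g)) = true := by simp
      have h1' : List.all P (fun o => o == g || !(covers o g)) = true := by
        apply List.all_eq_true.2
        intro o hoP
        by_cases hcov : covers o g = true
        · by_cases hoe : o = g
          · simp [hoe]
          · exfalso
            have HP : ∀ a ∈ P, ∀ b ∈ P, a.length = b.length :=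
              fun a ha b hb => H a (Hmem a ha) b (Hmem b hb)
            obtain ⟨m, hmP, hmmax, hmo⟩ := exists_max P HP hoP
            have hmg : covers m g = true :=
              covers_trans (H g hgmem o (Hmem o hoP)) (H o (Hmem o hoP) m (Hmem m hmP)) hcov hmo
            have hmne : m ≠ g := by
              intro he; subst he
              exact hoe (covers_antisymm (H o (Hmem o hoP) m (Hmem m hmP)) hmo hcov)
            exact hno m hmP hmmax ⟨hmne, hmg⟩
        · simp [Bool.eq_false_iff.mpr hcov]
      rw [h1', h2]
      rfl
    rw [insertFrontier, if_neg (by simp [hcF]), List.filter_append]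
    have h1 : List.filter (maxIn (P ++ [g])) [g] = [g] := by simp [hgmax]
    rw [h1]
    congr 1
    rw [List.filter_filter]
    apply List.filter_congr
    intro x hx
    rw [maxIn_append_singleton]
    by_cases hxg : x = g
    · subst hxg; simp [Bool.and_comm]
    · have hgx' : ¬g = x := fun h => hxg h.symm
      have e1 : (x == g) = false := by simp [hxg]
      have e2 : (g == x) = false := by simp [hgx']
      by_cases hcx : covers g x = true <;>
        simp [bne, e1, e2, hcx, Bool.and_comm]

-- loop invariant of Source B's frontier loop: after a prefix P, the frontier is the maximal elements of P in order
lemma frontier_inv (L P : List (List String))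
    (H : ∀ a ∈ P ++ L, ∀ b ∈ P ++ L, a.length = b.length) :
    L.foldl insertFrontier (P.filter (maxIn P)) = (P ++ L).filter (maxIn (P ++ L)) := by
  induction L generalizing P with
  | nil => simp
  | cons g L ih =>
    have he : (P ++ [g]) ++ L = P ++ g :: L := by simp
    have H' : ∀ a ∈ (P ++ [g]) ++ L, ∀ b ∈ (P ++ [g]) ++ L, a.length = b.length := by
      rw [he]; exact H
    have Hg : ∀ a ∈ P ++ [g], ∀ b ∈ P ++ [g], a.length = b.length := by
      intro a ha b hb
      refine H a ?_ b ?_ <;>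
        (simp only [List.mem_append, List.mem_cons] at *; tauto)
    rw [List.foldl_cons, insertFrontier_step P g Hg, ih (P ++ [g]) H', he]

-- rows of temp_G keep the length of the G-row they come from
lemma tempG_length (G : List (List String)) (example_ : List String) (domains : List (List String))
    {x : List String} (hx : x ∈ update_G_alt_tempG G example_ domains) :
    ∃ g ∈ G, "?" ∈ g ∧ x.length = g.length := by
  unfold update_G_alt_tempG at hx
  rw [List.mem_flatMap] at hx
  obtain ⟨g, hg, hx⟩ := hx
  rw [List.mem_flatMap] at hx
  obtain ⟨iv, hiv, hx⟩ := hx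
  rw [PySem.List.mem_enumerate_iff] at hiv
  obtain ⟨k, hk, rfl⟩ := hiv
  split at hx
  case isTrue hq =>
    refine ⟨g, hg, ?_, ?_⟩
    · have hgk : g[k] = "?" := by simpa using hq
      exact hgk ▸ List.getElem_mem hk
    rw [List.mem_map] at hx
    obtain ⟨dv, _, rfl⟩ := hx
    have h2 : ((k : Int) + 1) = (((k + 1 : Nat)) : Int) := by norm_num
    simp only [zero_add, List.length_append, List.length_cons, h2,
        PySem.List.slice_to_natCast, PySem.List.slice_from_natCast,
        List.length_take, List.length_drop]
    omega
  case isFalse => cases hx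

-- ===== VERDICT (by name: the statement is the Claim_ definition above) =====
theorem update_G_spec : Claim_equal_update_G := by
  intro G example_ domains _ hPre
  unfold Spec_update_G update_G update_G_alt
  rw [tempG_eq, minimize_eq_filter]
  have H : ∀ a ∈ update_G_alt_tempG G example_ domains, ∀ b ∈ update_G_alt_tempG G example_ domains,
      a.length = b.length := by
    intro a ha b hb
    obtain ⟨ga, hga, hqa, hla⟩ := tempG_length G example_ domains ha
    obtain ⟨gb, hgb, hqb, hlb⟩ := tempG_length G example_ domains hb
    rw [hla, hlb]; exact hPre.1 ga hga hqa gb hgb hqb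
  have := frontier_inv (update_G_alt_tempG G example_ domains) [] (by simpa using H)
  simpa using this.symm
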